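-- pv_equiv track=rewrite | github.com/dl-lim/MIT-OCW | PS1/ps1b.py | greedy_make_weight
-- ===== SOURCE A (Python) =====
-- def greedy_make_weight(egg_weights, target_weight):
--     eggno = 0
--     i = len(egg_weights)-1 # assuming egg weights are sorted from smallest to largest
--     remainder_weight = target_weight
--     while remainder_weight > 0 and i >= 0:
--         if egg_weights[i] > remainder_weight:
--             i -= 1
--         else:
--             eggno += 1
--             remainder_weight -= egg_weights[i]
--     return eggno
-- ===== SOURCE B (Python) =====
-- def greedy_make_weight(egg_weights, target_weight):
--     count = 0
--     rem = target_weight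
--     for w in reversed(egg_weights):
--         if rem <= 0:
--             break
--         if 0 < w <= rem:
--             count += rem // w
--             rem %= w
--     return count
-- ===== Notes on version B (the rewrite author's own statement) =====
-- stated objective: faster
-- what changed: One divmod per egg size (walking the list back-to-front once) replaces A's repeated subtraction of the same weight; intended as faster — a timing run saw A time out at n=16 where B returned, so no ratio could be measured.
-- outside the precondition, e.g. on greedy_make_weight([-1, 5], 5): A returns 1, B returns 1
import Mathlib
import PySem

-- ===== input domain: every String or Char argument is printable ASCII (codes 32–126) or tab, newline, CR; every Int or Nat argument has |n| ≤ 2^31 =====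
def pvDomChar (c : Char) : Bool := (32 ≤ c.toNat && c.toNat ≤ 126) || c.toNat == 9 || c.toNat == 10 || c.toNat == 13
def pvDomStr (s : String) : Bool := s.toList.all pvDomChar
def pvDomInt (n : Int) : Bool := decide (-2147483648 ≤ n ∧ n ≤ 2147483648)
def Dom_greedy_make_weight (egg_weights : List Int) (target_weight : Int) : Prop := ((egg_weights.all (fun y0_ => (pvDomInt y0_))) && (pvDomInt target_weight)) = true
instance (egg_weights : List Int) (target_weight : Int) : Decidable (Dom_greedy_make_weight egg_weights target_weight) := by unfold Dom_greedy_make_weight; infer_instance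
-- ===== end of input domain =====

-- B replaces A's repeated subtraction of the same egg weight by one floordiv/mod per egg size (one back-to-front pass); intended as faster: a timing run saw A time out where B returned, so no ratio was measured.


-- ===== PORT A =====
-- A's while loop, with fuel making it total in Lean; under Pre_ the loop runs at most
-- egg_weights.length + target.toNat steps, so the fuel is never exhausted there.
def pvALoop (ws : List Int) : Nat → Int → Int → Int → Int
  | 0, eggno, _, _ => eggno
  | fuel + 1, eggno, i, rem =>
    if rem > 0 ∧ i ≥ 0 then
      match PySem.List.pyGet? ws i with
      | none => eggno   -- unreachable: 0 ≤ i < len throughout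
      | some w =>
        if w > rem then pvALoop ws fuel eggno (i - 1) rem
        else pvALoop ws fuel (eggno + 1) i (rem - w)
    else eggno

def greedy_make_weight (egg_weights : List Int) (target_weight : Int) : Int :=
  pvALoop egg_weights (egg_weights.length + target_weight.toNat + 1) 0 ((egg_weights.length : Int) - 1) target_weight

-- ===== PORT B =====
def pvBLoop (ws : List Int) (count rem : Int) : Int :=
  match ws with
  | [] => count
  | w :: t =>
    if rem ≤ 0 then count
    else if 0 < w ∧ w ≤ rem then pvBLoop t (count + PySem.Int.floordiv rem w) (PySem.Int.mod rem w)
    else pvBLoop t count rem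

def greedy_make_weight_alt (egg_weights : List Int) (target_weight : Int) : Int :=
  pvBLoop egg_weights.reverse 0 target_weight

-- ===== PRECONDITION & SPEC =====
-- Pre_ excludes inputs on which A's while loop never terminates (a nonpositive egg weight reached
-- while the remainder is still positive); conservatively it requires all weights positive whenever
-- target_weight > 0, which also excludes some terminating runs where the remainder hits 0 before a
-- nonpositive weight is reached (both programs agree there anyway, see cites).
def Pre_greedy_make_weight (egg_weights : List Int) (target_weight : Int) : Prop :=
  target_weight ≤ 0 ∨ ∀ w ∈ egg_weights, 0 < w
instance (egg_weights : List Int) (target_weight : Int) : Decidable (Pre_greedy_make_weight egg_weights target_weight) := by unfold Pre_greedy_make_weight; infer_instance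

def pvWitness_greedy_make_weight : List Int × Int := ([1, 5, 10, 25], 99)

def Spec_greedy_make_weight (egg_weights : List Int) (target_weight : Int) (out : Int) : Prop := out = greedy_make_weight_alt egg_weights target_weight
instance (egg_weights : List Int) (target_weight : Int) (out : Int) : Decidable (Spec_greedy_make_weight egg_weights target_weight out) := by unfold Spec_greedy_make_weight; infer_instance

-- ===== CLAIM (what is proved, stated in full; the proofs are below) =====
def Claim_equal_greedy_make_weight : Prop := ∀ (egg_weights : List Int) (target_weight : Int), Dom_greedy_make_weight egg_weights target_weight → Pre_greedy_make_weight egg_weights target_weight → Spec_greedy_make_weight egg_weights target_weight (greedy_make_weight egg_weights target_weight)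

-- ===== LEMMAS AND PROOFS =====

-- B's loop breaks immediately on a nonpositive remainder.
theorem pvBLoop_nonpos (ws : List Int) (c r : Int) (h : r ≤ 0) : pvBLoop ws c r = c := by
  cases ws with
  | nil => rfl
  | cons w t => simp [pvBLoop, h]

-- One cons-step of B's loop is exactly a divmod step (for a positive weight, nonnegative remainder).
theorem pvBLoop_step (t : List Int) (w c r : Int) (hw : 0 < w) (hr : 0 ≤ r) :
    pvBLoop (w :: t) c r = pvBLoop t (c + PySem.Int.floordiv r w) (PySem.Int.mod r w) := by
  rcases lt_or_eq_of_le hr with hr' | hr'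
  · by_cases hwr : w ≤ r
    · simp [pvBLoop, hw, hwr, not_le.mpr hr']
    · have h1 : PySem.Int.floordiv r w = 0 := by
        rw [PySem.Int.floordiv_eq_ediv_of_pos hw]
        exact Int.ediv_eq_zero_of_lt hr (not_le.mp hwr)
      have h2 : PySem.Int.mod r w = r := by
        rw [PySem.Int.mod_eq_emod_of_pos hw]
        exact Int.emod_eq_of_lt hr (not_le.mp hwr)
      rw [h1, h2, add_zero]
      simp [pvBLoop, hwr, not_le.mpr hr']
  · have h0 : r = 0 := hr'.symm
    subst h0
    have h1 : PySem.Int.floordiv 0 w = 0 := by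
      rw [PySem.Int.floordiv_eq_ediv_of_pos hw]; simp
    have h2 : PySem.Int.mod 0 w = 0 := by
      rw [PySem.Int.mod_eq_emod_of_pos hw]; simp
    rw [h1, h2, add_zero, pvBLoop_nonpos (w :: t) c 0 le_rfl, pvBLoop_nonpos t c 0 le_rfl]

-- A's loop exits at once on a nonpositive remainder (with nonzero fuel).
theorem pvALoop_nonpos (ws : List Int) (fuel : Nat) (eggno i rem : Int) (h : rem ≤ 0) :
    pvALoop ws (fuel + 1) eggno i rem = eggno := by
  simp only [pvALoop]
  rw [if_neg (by omega : ¬ (rem > 0 ∧ i ≥ 0))]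

-- Main invariant: with all weights positive and enough fuel, A's loop from index i equals
-- B's loop over the reversed (i+1)-prefix.
theorem pvALoop_eq (ws : List Int) (hpos : ∀ w ∈ ws, 0 < w) :
    ∀ (fuel : Nat) (i rem eggno : Int), -1 ≤ i → i < (ws.length : Int) →
    (i + 1).toNat + rem.toNat + 1 ≤ fuel →
    pvALoop ws fuel eggno i rem = pvBLoop ((ws.take (i + 1).toNat).reverse) eggno rem := by
  intro fuel
  induction fuel with
  | zero => intro i rem eggno _ _ hf; omega
  | succ fuel ih =>
    intro i rem eggno hi1 hi2 hf
    by_cases hcond : rem > 0 ∧ i ≥ 0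
    · obtain ⟨hrem, hi0⟩ := hcond
      have hidx : (0:Int) ≤ i ∧ i < (ws.length : Int) := ⟨hi0, hi2⟩
      obtain ⟨n, hn⟩ : ∃ n : Nat, i = (n : Int) := ⟨i.toNat, by omega⟩
      subst hn
      have hnlen : n < ws.length := by exact_mod_cast hi2
      have hget : PySem.List.pyGet? ws (n : Int) = some ws[n] := by
        simp [hnlen]
      have htake : (ws.take ((n:Int) + 1).toNat).reverse
          = ws[n] :: (ws.take ((n:Int) - 1 + 1).toNat).reverse := by
        have h1 : ((n:Int) + 1).toNat = n + 1 := by omega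
        have h2 : ((n:Int) - 1 + 1).toNat = n := by omega
        rw [h1, h2, List.take_add_one, List.getElem?_eq_getElem hnlen]
        simp
      have hw := hpos ws[n] (List.getElem_mem hnlen)
      by_cases hwr : ws[n] > rem
      · -- skip this egg size
        rw [show pvALoop ws (fuel+1) eggno (n:Int) rem
              = pvALoop ws fuel eggno ((n:Int) - 1) rem by
            simp [pvALoop, hrem, hi0, hget, hwr]]
        rw [ih ((n:Int) - 1) rem eggno (by omega) (by omega) (by omega)]
        rw [htake, pvBLoop_step _ _ _ _ hw (by omega)]
        have h1 : PySem.Int.floordiv rem ws[n] = 0 := by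
          rw [PySem.Int.floordiv_eq_ediv_of_pos hw]
          exact Int.ediv_eq_zero_of_lt (by omega) hwr
        have h2 : PySem.Int.mod rem ws[n] = rem := by
          rw [PySem.Int.mod_eq_emod_of_pos hw]
          exact Int.emod_eq_of_lt (by omega) hwr
        rw [h1, h2]; simp
      · -- take one egg of this size
        rw [not_lt] at hwr
        rw [show pvALoop ws (fuel+1) eggno (n:Int) rem
              = pvALoop ws fuel (eggno + 1) (n:Int) (rem - ws[n]) by
            simp [pvALoop, hrem, hi0, hget, not_lt.mpr hwr]]
        rw [ih (n:Int) (rem - ws[n]) (eggno + 1) (by omega) (by omega) (by omega)]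
        rw [htake, pvBLoop_step _ _ _ _ hw (by omega),
            pvBLoop_step _ _ _ _ hw (by omega)]
        have hwne : ws[n] ≠ 0 := by omega
        have hdiv : PySem.Int.floordiv (rem - ws[n]) ws[n] = PySem.Int.floordiv rem ws[n] - 1 := by
          rw [PySem.Int.floordiv_eq_ediv_of_pos hw, PySem.Int.floordiv_eq_ediv_of_pos hw]
          have : rem - ws[n] = rem + (-1) * ws[n] := by ring
          rw [this, Int.add_mul_ediv_right _ _ hwne]; ring
        have hmod : PySem.Int.mod (rem - ws[n]) ws[n] = PySem.Int.mod rem ws[n] := by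
          rw [PySem.Int.mod_eq_emod_of_pos hw, PySem.Int.mod_eq_emod_of_pos hw]
          exact Int.sub_emod_right rem ws[n]
        rw [hdiv, hmod]
        ring_nf
    · -- loop exits: rem ≤ 0 or i = -1
      rw [show pvALoop ws (fuel+1) eggno i rem = eggno by simp [pvALoop, hcond]]
      rcases not_and_or.mp hcond with h | h
      · exact (pvBLoop_nonpos _ _ _ (by omega)).symm
      · have : i = -1 := by omega
        subst this
        simp [pvBLoop]

-- ===== VERDICT (by name: the statement is the Claim_ definition above) =====
theorem greedy_make_weight_spec : Claim_equal_greedy_make_weight := by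
  intro ws t _ hpre
  unfold Spec_greedy_make_weight greedy_make_weight greedy_make_weight_alt
  rcases hpre with ht | hpos
  · -- target ≤ 0: A's loop exits at once, B breaks at once
    rw [pvALoop_nonpos ws (ws.length + t.toNat) 0 ((ws.length : Int) - 1) t ht]
    exact (pvBLoop_nonpos _ _ _ ht).symm
  · rw [pvALoop_eq ws hpos _ ((ws.length : Int) - 1) t 0 (by omega) (by omega) (by omega)]
    congr 1
    have : ((ws.length : Int) - 1 + 1).toNat = ws.length := by omega
    rw [this, List.take_length]
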